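-- pv_equiv track=rewrite | github.com/ernis2003/Data-visualizations-and-ML-projects | Crime visualization.py | GettingArrayOfOffensive
-- ===== SOURCE A (Python) =====
-- def GettingArrayOfOffensive(columnName, offenseTypesGroup):
--     finalArray = []
--     for i in range(len(offenseTypesGroup)):
--         searchedValues = offenseTypesGroup[i]
--         array = []
--         for j in range(len(columnName)):
--             if (columnName[j] == searchedValues):
--                 array.append(columnName[j])
--         finalArray.append(array)
--     return finalArray
-- ===== SOURCE B (Python) =====
-- def GettingArrayOfOffensive(columnName, offenseTypesGroup):
--     counts = {}
--     for v in columnName: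
--         counts[v] = counts.get(v, 0) + 1
--     return [[t] * counts.get(t, 0) for t in offenseTypesGroup]
-- ===== Notes on version B (the rewrite author's own statement) =====
-- stated objective: alternative
-- what changed: Replaces the per-type inner scan of columnName with one counting pass building a dict, then emits each group as the type repeated count times.
import Mathlib
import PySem

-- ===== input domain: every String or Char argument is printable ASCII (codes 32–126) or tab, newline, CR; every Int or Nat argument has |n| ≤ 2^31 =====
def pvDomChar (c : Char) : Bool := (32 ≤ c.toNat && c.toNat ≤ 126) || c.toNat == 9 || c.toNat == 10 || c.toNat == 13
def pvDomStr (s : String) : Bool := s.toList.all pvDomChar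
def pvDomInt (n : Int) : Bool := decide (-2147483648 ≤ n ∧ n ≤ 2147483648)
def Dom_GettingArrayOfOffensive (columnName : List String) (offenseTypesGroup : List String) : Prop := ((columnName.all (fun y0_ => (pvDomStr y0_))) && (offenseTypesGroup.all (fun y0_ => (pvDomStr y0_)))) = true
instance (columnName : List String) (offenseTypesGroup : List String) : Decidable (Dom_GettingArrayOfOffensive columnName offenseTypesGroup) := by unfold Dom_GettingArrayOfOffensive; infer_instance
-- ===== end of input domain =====

-- B replaces A's per-type inner scan with one dict-counting pass over columnName,
-- emitting each group as the type repeated count times (objective: alternative decomposition).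

-- ===== PORT A =====
def GettingArrayOfOffensive (columnName : List String) (offenseTypesGroup : List String) : List (List String) :=
  (PySem.List.pyRange 0 (PySem.List.len offenseTypesGroup) 1).foldl (fun finalArray i =>
    let searchedValues := PySem.List.pyGetD offenseTypesGroup i ""
    let array := (PySem.List.pyRange 0 (PySem.List.len columnName) 1).foldl (fun arr j =>
      if PySem.List.pyGetD columnName j "" == searchedValues then
        arr ++ [PySem.List.pyGetD columnName j ""]
      else arr) []
    finalArray ++ [array]) []

-- ===== PORT B =====
def GettingArrayOfOffensive_alt (columnName : List String) (offenseTypesGroup : List String) : List (List String) :=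
  let counts : PySem.Dict String Int :=
    columnName.foldl (fun d v => d.modify v 0 (· + 1)) PySem.Dict.empty
  offenseTypesGroup.map (fun t => PySem.List.pyRepeat [t] (counts.getD t 0))

-- ===== PRECONDITION & SPEC =====
def Spec_GettingArrayOfOffensive (columnName : List String) (offenseTypesGroup : List String) (out : List (List String)) : Prop := out = GettingArrayOfOffensive_alt columnName offenseTypesGroup
instance (columnName : List String) (offenseTypesGroup : List String) (out : List (List String)) : Decidable (Spec_GettingArrayOfOffensive columnName offenseTypesGroup out) := by unfold Spec_GettingArrayOfOffensive; infer_instance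

-- ===== CLAIM (what is proved, stated in full; the proofs are below) =====
def Claim_equal_GettingArrayOfOffensive : Prop := ∀ (columnName : List String) (offenseTypesGroup : List String), Dom_GettingArrayOfOffensive columnName offenseTypesGroup → Spec_GettingArrayOfOffensive columnName offenseTypesGroup (GettingArrayOfOffensive columnName offenseTypesGroup)

-- ===== LEMMAS AND PROOFS =====

-- ===== VERDICT (by name: the statement is the Claim_ definition above) =====
theorem GettingArrayOfOffensive_spec : Claim_equal_GettingArrayOfOffensive := by
  intro columnName offenseTypesGroup _
  unfold Spec_GettingArrayOfOffensive GettingArrayOfOffensive GettingArrayOfOffensive_alt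
  rw [← PySem.Dict.counter_eq_foldl]
  rw [PySem.List.foldl_pyRange_zero_pyGetD offenseTypesGroup ""
        (fun finalArray searchedValues =>
          finalArray ++ [(PySem.List.pyRange 0 (PySem.List.len columnName) 1).foldl (fun arr j =>
            if PySem.List.pyGetD columnName j "" == searchedValues then
              arr ++ [PySem.List.pyGetD columnName j ""]
            else arr) []]) []]
  rw [PySem.List.foldl_append_singleton_eq_map]
  simp only [List.nil_append]
  apply List.map_congr_left
  intro sv _
  rw [PySem.List.foldl_pyRange_zero_pyGetD columnName ""
        (fun arr x => if x == sv then arr ++ [x] else arr) []]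
  rw [PySem.List.foldl_append_if_eq_filter]
  rw [PySem.Dict.getD_counter, PySem.List.pyRepeat_singleton]
  simp [List.filter_beq]
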